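-- pv_equiv track=rewrite | github.com/picografix/pythonProjects | bitwise.py | apply
-- ===== SOURCE A (Python) =====
-- def apply_and(a,b):
--     return a&b
--
-- def apply(li,n,a):
--     tryNo = 0
--     while tryNo < n:
--         for i in range(tryNo,n):
--             temp = apply_and(li[i],a)
--             if li.count(temp) >=1:
--                 return tryNo+1
--         li[tryNo]=apply_and(li[tryNo],a)
--         tryNo +=1
--     return -1
-- ===== SOURCE B (Python) =====
-- def apply(li, n, a):
--     # Closed form, no pass simulation.  A's pass k sees the list with prefix [0,k)
--     # masked and the rest original; since masking is idempotent, pass 0 succeeds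
--     # iff some masked value occurs among the original values, and otherwise the
--     # first successful pass is j+1 for the smallest j whose masked value
--     # reappears later among the masked values.  (A mutates li in place; B does not.)
--     m = min(n, len(li))
--     masked = [li[i] & a for i in range(m)]
--     originals = set(li)
--     if any(v in originals for v in masked):
--         return 1
--     best = None
--     seen = set()
--     for j in range(len(masked) - 1, -1, -1):
--         if masked[j] in seen:
--             best = j
--         else:
--             seen.add(masked[j])
--     return -1 if best is None else best + 2
-- ===== Notes on version B (the rewrite author's own statement) =====
-- stated objective: faster
-- what changed: B does not simulate A's passes at all: it proves pass 0 succeeds iff some masked value li[i]&a occurs among the original values, and otherwise the answer is j+2 for the smallest j whose masked value reappears later among the masked values, computed by one set-membership scan plus one reverse scan with a seen-set.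
import Mathlib
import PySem

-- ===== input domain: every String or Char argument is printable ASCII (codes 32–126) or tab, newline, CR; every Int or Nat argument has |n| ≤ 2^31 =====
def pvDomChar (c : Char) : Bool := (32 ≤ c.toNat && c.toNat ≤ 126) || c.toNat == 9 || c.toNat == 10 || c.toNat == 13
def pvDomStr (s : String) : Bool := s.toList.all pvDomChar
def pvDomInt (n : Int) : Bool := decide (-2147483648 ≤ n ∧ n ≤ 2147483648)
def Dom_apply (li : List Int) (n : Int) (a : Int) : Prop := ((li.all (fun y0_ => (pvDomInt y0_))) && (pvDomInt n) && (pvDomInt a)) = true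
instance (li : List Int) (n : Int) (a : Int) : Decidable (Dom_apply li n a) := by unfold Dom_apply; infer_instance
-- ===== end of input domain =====

-- B replaces A's pass-by-pass simulation with a closed form: pass 0 succeeds iff some masked
-- value occurs among the originals, otherwise the answer is j+2 for the least j whose masked
-- value reappears later among the masked values; A mutates li in place, B does not — the
-- equivalence proved here is about the return value only.


-- ===== PORT A =====
def applyAnd (a b : Int) : Int := PySem.Int.band a b

-- the while loop of A; fuel = (n - tryNo).toNat
def applyLoopA (li : List Int) (n : Int) (a : Int) (tryNo : Int) : Nat → Int
  | 0 => -1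
  | fuel + 1 =>
    if (PySem.List.pyRange tryNo n 1).any (fun i =>
         decide (1 ≤ PySem.List.count li (applyAnd (PySem.List.pyGetD li i 0) a))) then
      tryNo + 1
    else
      applyLoopA (PySem.List.pySetD li tryNo (applyAnd (PySem.List.pyGetD li tryNo 0) a)) n a (tryNo + 1) fuel

def apply (li : List Int) (n : Int) (a : Int) : Int := applyLoopA li n a 0 n.toNat

-- ===== PORT B =====
-- Source B's reversed-index for loop: j runs from len-1 down to 0 with state (best, seen);
-- rendered as a foldr over the (index, value) pairs, which visits indices in descending order
def applyRevLoopB (masked : List Int) : Option Int × PySem.Set Int :=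
  (PySem.List.enumerate masked 0).foldr
    (fun jv st =>
      if PySem.Set.contains st.2 jv.2 then (some jv.1, st.2)
      else (st.1, PySem.Set.add st.2 jv.2))
    (none, PySem.Set.empty)

def apply_alt (li : List Int) (n : Int) (a : Int) : Int :=
  let m := min n (li.length : Int)
  let masked := (PySem.List.pyRange 0 m 1).map (fun i => PySem.Int.band (PySem.List.pyGetD li i 0) a)
  let originals := PySem.Set.ofList li
  if masked.any (fun v => PySem.Set.contains originals v) then 1
  else
    match (applyRevLoopB masked).1 with
    | none => -1
    | some j => j + 2

-- ===== PRECONDITION & SPEC =====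
-- Pre_ holds exactly where the Python A returns normally: outside it (n exceeds the list length
-- and no masked element li[i]&a occurs in the list) A raises IndexError on the first pass.
def Pre_apply (li : List Int) (n : Int) (a : Int) : Prop :=
  n ≤ (li.length : Int) ∨ li.any (fun x => li.contains (PySem.Int.band x a)) = true
instance (li : List Int) (n : Int) (a : Int) : Decidable (Pre_apply li n a) := by unfold Pre_apply; infer_instance
def pvWitness_apply : List Int × Int × Int := ([1, 2], 2, 3)
def Spec_apply (li : List Int) (n : Int) (a : Int) (out : Int) : Prop := out = apply_alt li n a
instance (li : List Int) (n : Int) (a : Int) (out : Int) : Decidable (Spec_apply li n a out) := by unfold Spec_apply; infer_instance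

-- ===== CLAIM (what is proved, stated in full; the proofs are below) =====
def Claim_equal_apply : Prop := ∀ (li : List Int) (n : Int) (a : Int), Dom_apply li n a → Pre_apply li n a → Spec_apply li n a (apply li n a)

-- ===== LEMMAS AND PROOFS =====

-- the least index (counting from t) whose value reappears later in the list
def firstDup (t : Int) : List Int → Option Int
  | [] => none
  | x :: xs => if x ∈ xs then some t else firstDup (t + 1) xs

-- membership as an indexed getD fact, drop-relative
theorem mem_drop_getD_iff (l : List Int) (j : Nat) (v : Int) :
    v ∈ l.drop j ↔ ∃ i : Nat, j ≤ i ∧ i < l.length ∧ l.getD i 0 = v := by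
  constructor
  · intro h
    obtain ⟨i, hi, he⟩ := List.mem_iff_getElem.mp h
    refine ⟨j + i, by omega, by simp at hi; omega, ?_⟩
    rw [List.getD_eq_getElem l 0 (by simp at hi; omega)]
    simpa [List.getElem_drop] using he
  · rintro ⟨i, h1, h2, he⟩
    have : (l.drop j)[i - j]'(by simp; omega) = v := by
      rw [List.getElem_drop]
      rw [List.getD_eq_getElem l 0 h2] at he
      convert he using 2
      omega
    exact this ▸ List.getElem_mem _
theorem mem_getD_iff (l : List Int) (v : Int) :
    v ∈ l ↔ ∃ i : Nat, i < l.length ∧ l.getD i 0 = v := by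
  have := mem_drop_getD_iff l 0 v
  simpa using this

-- Source B's reverse scan computes firstDup, and its seen-set holds exactly the values scanned
theorem revLoopB_spec (xs : List Int) : ∀ (t : Int),
    ((PySem.List.enumerate xs t).foldr
      (fun jv st =>
        if PySem.Set.contains st.2 jv.2 then (some jv.1, st.2)
        else (st.1, PySem.Set.add st.2 jv.2))
      ((none : Option Int), PySem.Set.empty)).1 = firstDup t xs ∧
    ∀ v : Int, (((PySem.List.enumerate xs t).foldr
      (fun jv st =>
        if PySem.Set.contains st.2 jv.2 then (some jv.1, st.2)
        else (st.1, PySem.Set.add st.2 jv.2))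
      ((none : Option Int), PySem.Set.empty)).2.contains v = true ↔ v ∈ xs) := by
  induction xs with
  | nil => intro t; simp [PySem.List.enumerate, firstDup, PySem.Set.empty]
  | cons x xs ih =>
    intro t
    obtain ⟨ih1, ih2⟩ := ih (t + 1)
    rw [PySem.List.enumerate_cons]
    simp only [List.foldr_cons]
    by_cases hx : x ∈ xs
    · rw [if_pos ((ih2 x).mpr hx)]
      refine ⟨by simp [firstDup, hx], fun v => ?_⟩
      rw [ih2 v]
      constructor
      · exact fun h => List.mem_cons_of_mem _ h
      · intro h; rcases List.mem_cons.mp h with h | h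
        · exact h ▸ hx
        · exact h
    · rw [if_neg (by rw [ih2 x]; exact hx)]
      constructor
      · simp only [firstDup]
        rw [if_neg hx]
        exact ih1
      · intro v
        rw [PySem.Set.contains_iff, PySem.Set.mem_add, List.mem_cons]
        have h2 := ih2 v
        rw [PySem.Set.contains_iff] at h2
        rw [h2]
        tauto

-- A's remaining passes compute firstDup on the tail of the masked list
theorem loopA_firstDup (li : List Int) (n a : Int) (M : List Int)
    (hn : n ≤ (li.length : Int))
    (hMlen : M.length = n.toNat)
    (hMget : ∀ i : Nat, i < n.toNat → M.getD i 0 = PySem.Int.band (li.getD i 0) a)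
    (hnone : ∀ v ∈ M, v ∉ li) :
    ∀ (fuel : Nat) (k : Int) (cur : List Int),
    1 ≤ k → k ≤ n → fuel = (n - k).toNat →
    cur.length = li.length →
    (∀ idx : Nat, idx < li.length →
        cur.getD idx 0 = if (idx : Int) < k then M.getD idx 0 else li.getD idx 0) →
    (∀ j : Nat, (j : Int) + 1 < k → M.getD j 0 ∉ M.drop (j + 1)) →
    applyLoopA cur n a k fuel =
      (match firstDup (k - 1) (M.drop (k - 1).toNat) with
       | some j => j + 2
       | none => -1) := by
  intro fuel
  induction fuel with
  | zero =>
    intro k cur hk1 hkn hfuel hlen hinv hprev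
    have hkeq : k = n := by omega
    subst hkeq
    have hL : (k - 1).toNat < M.length := by omega
    rw [List.drop_eq_getElem_cons hL]
    have hnil : M.drop ((k - 1).toNat + 1) = [] := by
      apply List.drop_eq_nil_of_le
      omega
    rw [hnil]
    simp [applyLoopA, firstDup]
  | succ fuel ih =>
    intro k cur hk1 hkn hfuel hlen hinv hprev
    have hkltn : k < n := by omega
    have hkM : (k - 1).toNat < M.length := by omega
    -- reading the untouched part of cur
    have hcur : ∀ i : Int, k ≤ i → i < n → PySem.List.pyGetD cur i 0 = li.getD i.toNat 0 := by
      intro i h1 h2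
      rw [PySem.List.pyGetD_eq_getElem cur 0 (by omega) (by omega)]
      rw [← List.getD_eq_getElem cur 0 (by omega)]
      rw [hinv i.toNat (by omega)]
      rw [if_neg (by omega)]
    have hmask : ∀ i : Int, k ≤ i → i < n →
        applyAnd (PySem.List.pyGetD cur i 0) a = M.getD i.toNat 0 := by
      intro i h1 h2
      rw [hcur i h1 h2, hMget i.toNat (by omega)]
      rfl
    -- the pass-k test is exactly "M[k-1] occurs again at index ≥ k"
    have hcond : ((PySem.List.pyRange k n 1).any (fun i =>
         decide (1 ≤ PySem.List.count cur (applyAnd (PySem.List.pyGetD cur i 0) a))))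
        = decide (M.getD (k - 1).toNat 0 ∈ M.drop k.toNat) := by
      rw [Bool.eq_iff_iff]
      simp only [List.any_eq_true, decide_eq_true_eq]
      constructor
      · rintro ⟨i, hi, hcnt⟩
        rw [PySem.List.mem_pyRange_one] at hi
        rw [hmask i hi.1 hi.2, PySem.List.count_eq] at hcnt
        have hv : M.getD i.toNat 0 ∈ cur := List.count_pos_iff.mp (by omega)
        obtain ⟨idx, hidx, he⟩ := (mem_getD_iff cur _).mp hv
        rw [hlen] at hidx
        rw [hinv idx hidx] at he
        by_cases hik : (idx : Int) < k
        · by_cases hik2 : (idx : Int) + 1 < k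
          · exfalso
            rw [if_pos hik] at he
            apply hprev idx hik2
            rw [he]
            exact (mem_drop_getD_iff M (idx + 1) _).mpr
              ⟨i.toNat, by omega, by omega, rfl⟩
          · have hidxk : idx = (k - 1).toNat := by omega
            subst hidxk
            rw [if_pos hik] at he
            rw [he]
            exact (mem_drop_getD_iff M k.toNat _).mpr
              ⟨i.toNat, by omega, by omega, rfl⟩
        · exfalso
          rw [if_neg hik] at he
          apply hnone (M.getD i.toNat 0) ((mem_getD_iff M _).mpr ⟨i.toNat, by omega, rfl⟩)
          exact (mem_getD_iff li _).mpr ⟨idx, hidx, he⟩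
      · intro hd
        obtain ⟨i, hge, hilt, he⟩ := (mem_drop_getD_iff M k.toNat _).mp hd
        refine ⟨(i : Int), ?_, ?_⟩
        · rw [PySem.List.mem_pyRange_one]
          constructor <;> omega
        · have hki : k ≤ (i : Int) := by omega
          have hin : (i : Int) < n := by omega
          rw [hmask (i : Int) hki hin, PySem.List.count_eq]
          have : M.getD (i : Int).toNat 0 ∈ cur := by
            apply (mem_getD_iff cur _).mpr
            refine ⟨(k - 1).toNat, by omega, ?_⟩
            rw [hinv (k - 1).toNat (by omega), if_pos (by omega)]
            simp only [Int.toNat_natCast]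
            exact he.symm
          have := List.count_pos_iff.mpr this
          omega
    simp only [applyLoopA]
    rw [hcond]
    rw [List.drop_eq_getElem_cons hkM]
    have hsucc : (k - 1).toNat + 1 = k.toNat := by omega
    rw [hsucc, ← List.getD_eq_getElem M 0 hkM]
    by_cases hd : M.getD (k - 1).toNat 0 ∈ M.drop k.toNat
    · rw [if_pos (by simpa using hd)]
      simp only [firstDup, if_pos hd]
      show k + 1 = k - 1 + 2
      omega
    · rw [if_neg (by simpa using hd)]
      simp only [firstDup, if_neg hd]
      have hrec := ih (k + 1)
        (PySem.List.pySetD cur k (applyAnd (PySem.List.pyGetD cur k 0) a))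
        (by omega) (by omega) (by omega)
        (by rw [PySem.List.pySetD_of_nonneg cur _ (by omega)]; simp [hlen])
        ?hinv' ?hprev'
      case hinv' =>
        intro idx hidx
        rw [PySem.List.pySetD_of_nonneg cur _ (by omega)]
        rw [hmask k (le_refl k) hkltn]
        rw [List.getD_eq_getElem _ 0 (by simp; omega)]
        rw [List.getElem_set]
        by_cases hik : k.toNat = idx
        · rw [if_pos hik, if_pos (by omega)]
          rw [hik]
        · rw [if_neg hik, ← List.getD_eq_getElem cur 0 (by omega), hinv idx hidx]
          by_cases hik2 : (idx : Int) < k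
          · rw [if_pos hik2, if_pos (by omega)]
          · rw [if_neg hik2, if_neg (by omega)]
      case hprev' =>
        intro j hj
        by_cases hjk : (j : Int) + 1 < k
        · exact hprev j hjk
        · have : j = (k - 1).toNat := by omega
          subst this
          rw [hsucc]
          exact hd
      rw [hrec]
      have h1 : k - 1 + 1 = k := by ring
      have h3 : k + 1 - 1 = k := by ring
      rw [h1, h3]

-- B's pass-0 test holds iff some masked value occurs among the originals
theorem hitB_iff (li : List Int) (n a : Int) :
    (((PySem.List.pyRange 0 (min n (li.length : Int)) 1).map
        (fun i => PySem.Int.band (PySem.List.pyGetD li i 0) a)).any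
      (fun v => PySem.Set.contains (PySem.Set.ofList li) v) = true) ↔
    ∃ i : Nat, i < li.length ∧ (i : Int) < n ∧ PySem.Int.band (li.getD i 0) a ∈ li := by
  rw [List.any_eq_true]
  constructor
  · rintro ⟨v, hv, hc⟩
    rw [List.mem_map] at hv
    obtain ⟨i, hi, rfl⟩ := hv
    rw [PySem.List.mem_pyRange_one] at hi
    have hilen : i < (li.length : Int) := lt_of_lt_of_le hi.2 (min_le_right _ _)
    have hin : i < n := lt_of_lt_of_le hi.2 (min_le_left _ _)
    refine ⟨i.toNat, by omega, by omega, ?_⟩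
    rw [PySem.Set.contains_iff, PySem.Set.mem_ofList] at hc
    rw [PySem.List.pyGetD_eq_getElem li 0 hi.1 hilen] at hc
    rwa [List.getD_eq_getElem li 0 (by omega)]
  · rintro ⟨i, h1, h2, h3⟩
    refine ⟨PySem.Int.band (PySem.List.pyGetD li (i : Int) 0) a, ?_, ?_⟩
    · rw [List.mem_map]
      exact ⟨(i : Int), by rw [PySem.List.mem_pyRange_one]; constructor <;> omega, rfl⟩
    · rw [PySem.Set.contains_iff, PySem.Set.mem_ofList,
          PySem.List.pyGetD_eq_getElem li 0 (by omega) (by omega)]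
      rw [List.getD_eq_getElem li 0 h1] at h3
      simpa using h3

-- ===== VERDICT (by name: the statement is the Claim_ definition above) =====
theorem apply_spec : Claim_equal_apply := by
  intro li n a _ hpre
  unfold Pre_apply at hpre
  unfold Spec_apply
  by_cases hb : (((PySem.List.pyRange 0 (min n (li.length : Int)) 1).map
        (fun i => PySem.Int.band (PySem.List.pyGetD li i 0) a)).any
      (fun v => PySem.Set.contains (PySem.Set.ofList li) v)) = true
  · -- some masked value occurs among the originals: both return 1
    have hBr : apply_alt li n a = 1 := by
      unfold apply_alt
      simp only [hb, if_true]
    obtain ⟨i, h1, h2, h3⟩ := (hitB_iff li n a).mp hb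
    obtain ⟨f, hf⟩ : ∃ f, n.toNat = f + 1 := ⟨n.toNat - 1, by omega⟩
    unfold apply
    rw [hf]
    simp only [applyLoopA]
    rw [if_pos, hBr]
    · norm_num
    · apply List.any_eq_true.mpr
      refine ⟨(i : Int), by rw [PySem.List.mem_pyRange_one]; constructor <;> omega, ?_⟩
      rw [decide_eq_true_eq, PySem.List.count_eq]
      have : applyAnd (PySem.List.pyGetD li (i : Int) 0) a ∈ li := by
        show PySem.Int.band (PySem.List.pyGetD li (i : Int) 0) a ∈ li
        rw [PySem.List.pyGetD_eq_getElem li 0 (by omega) (by omega)]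
        rw [List.getD_eq_getElem li 0 h1] at h3
        simpa using h3
      have := List.count_pos_iff.mpr this
      omega
  · -- no masked value among the originals
    have hBr : apply_alt li n a =
        (match (applyRevLoopB ((PySem.List.pyRange 0 (min n (li.length : Int)) 1).map
            (fun i => PySem.Int.band (PySem.List.pyGetD li i 0) a))).1 with
         | none => -1
         | some j => j + 2) := by
      unfold apply_alt
      rw [if_neg hb]
    by_cases hn0 : n ≤ 0
    · -- no pass at all: both return -1
      have hm : ((PySem.List.pyRange 0 (min n (li.length : Int)) 1).map
          (fun i => PySem.Int.band (PySem.List.pyGetD li i 0) a)) = [] := by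
        rw [PySem.List.pyRange_one_eq_nil (by omega)]
        rfl
      rw [hBr, hm]
      unfold applyRevLoopB
      rw [PySem.List.enumerate_nil]
      unfold apply
      rw [show n.toNat = 0 from by omega]
      rfl
    · -- the main case: 0 < n, and Pre_ forces n ≤ len(li)
      have hnlen : n ≤ (li.length : Int) := by
        rcases hpre with h | h
        · exact h
        · by_contra hgt
          obtain ⟨x, hx, hcx⟩ := List.any_eq_true.mp h
          obtain ⟨ix, hix, rfl⟩ := List.mem_iff_getElem.mp hx
          apply hb
          apply (hitB_iff li n a).mpr
          refine ⟨ix, hix, by omega, ?_⟩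
          rw [List.getD_eq_getElem li 0 hix]
          simpa using hcx
      have hmin : min n (li.length : Int) = n := min_eq_left hnlen
      have hMlen : ((PySem.List.pyRange 0 (min n (li.length : Int)) 1).map
          (fun i => PySem.Int.band (PySem.List.pyGetD li i 0) a)).length = n.toNat := by
        rw [List.length_map, hmin, PySem.List.length_pyRange_one]
        omega
      have hMget : ∀ i : Nat, i < n.toNat →
          ((PySem.List.pyRange 0 (min n (li.length : Int)) 1).map
            (fun i => PySem.Int.band (PySem.List.pyGetD li i 0) a)).getD i 0
          = PySem.Int.band (li.getD i 0) a := by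
        intro i hi
        rw [List.getD_eq_getElem _ 0 (by omega), List.getElem_map,
            PySem.List.getElem_pyRange_one _ _ _ (by rw [PySem.List.length_pyRange_one]; omega)]
        rw [show (0 : Int) + (i : Int) = (i : Int) from by ring]
        rw [PySem.List.pyGetD_eq_getElem li 0 (by omega) (by omega)]
        rw [List.getD_eq_getElem li 0 (by omega)]
        simp
      have hnone : ∀ v ∈ ((PySem.List.pyRange 0 (min n (li.length : Int)) 1).map
          (fun i => PySem.Int.band (PySem.List.pyGetD li i 0) a)), v ∉ li := by
        intro v hv hvin
        exact hb (List.any_eq_true.mpr ⟨v, hv,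
          by rw [PySem.Set.contains_iff, PySem.Set.mem_ofList]; exact hvin⟩)
      obtain ⟨f, hf⟩ : ∃ f, n.toNat = f + 1 := ⟨n.toNat - 1, by omega⟩
      unfold apply
      rw [hf]
      simp only [applyLoopA]
      rw [if_neg]
      · rw [zero_add]
        have hrec := loopA_firstDup li n a _ hnlen hMlen hMget hnone f 1
          (PySem.List.pySetD li 0 (applyAnd (PySem.List.pyGetD li 0 0) a))
          le_rfl (by omega) (by omega)
          (by rw [PySem.List.pySetD_of_nonneg li _ (by omega)]; simp)
          ?_ ?_
        · rw [hrec, hBr]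
          have hfold := (revLoopB_spec ((PySem.List.pyRange 0 (min n (li.length : Int)) 1).map
              (fun i => PySem.Int.band (PySem.List.pyGetD li i 0) a)) 0).1
          have hrl : (applyRevLoopB ((PySem.List.pyRange 0 (min n (li.length : Int)) 1).map
              (fun i => PySem.Int.band (PySem.List.pyGetD li i 0) a))).1
              = firstDup 0 ((PySem.List.pyRange 0 (min n (li.length : Int)) 1).map
              (fun i => PySem.Int.band (PySem.List.pyGetD li i 0) a)) := by
            unfold applyRevLoopB
            exact hfold
          rw [hrl, show (1 : Int) - 1 = 0 from by ring]
          simp only [Int.toNat_zero, List.drop_zero]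
          cases firstDup 0 ((PySem.List.pyRange 0 (min n (li.length : Int)) 1).map
            (fun i => PySem.Int.band (PySem.List.pyGetD li i 0) a)) <;> rfl
        · -- the invariant after the first assignment li[0] = li[0] & a
          intro idx hidx
          rw [PySem.List.pySetD_of_nonneg li _ (by omega)]
          rw [List.getD_eq_getElem _ 0 (by simp; omega)]
          rw [List.getElem_set]
          by_cases h0 : idx = 0
          · subst h0
            rw [if_pos (by omega), if_pos (by omega)]
            rw [hMget 0 (by omega)]
            show applyAnd (PySem.List.pyGetD li 0 0) a = _
            show PySem.Int.band (PySem.List.pyGetD li 0 0) a = _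
            rw [PySem.List.pyGetD_zero]
          · rw [if_neg (by omega), if_neg (by omega)]
            rw [← List.getD_eq_getElem li 0 hidx]
        · intro j hj
          exact absurd hj (by omega)
      · -- pass 0 finds nothing
        intro hany
        obtain ⟨i, hi, hci⟩ := List.any_eq_true.mp hany
        rw [PySem.List.mem_pyRange_one] at hi
        rw [decide_eq_true_eq, PySem.List.count_eq] at hci
        have hv : applyAnd (PySem.List.pyGetD li i 0) a ∈ li := List.count_pos_iff.mp (by omega)
        have heq : applyAnd (PySem.List.pyGetD li i 0) a
            = ((PySem.List.pyRange 0 (min n (li.length : Int)) 1).map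
              (fun i => PySem.Int.band (PySem.List.pyGetD li i 0) a)).getD i.toNat 0 := by
          rw [hMget i.toNat (by omega)]
          show PySem.Int.band (PySem.List.pyGetD li i 0) a = _
          rw [PySem.List.pyGetD_eq_getElem li 0 (by omega) (by omega),
              List.getD_eq_getElem li 0 (by omega)]
        exact hnone _ ((mem_getD_iff _ _).mpr ⟨i.toNat, by omega, rfl⟩) (heq ▸ hv)
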